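-- pv_equiv track=rewrite | github.com/bmaisonn/advent_of_code_2019 | elves_password.py | meets_criteras
-- ===== SOURCE A (Python) =====
-- def nth_digit(n, idx):
--     return n // 10**idx % 10
--
-- def nb_digits(n):
--     nb = 1
--     while(True):
--         n = n // 10
--         if n > 0:
--             nb += 1
--         else:
--             break
--     return nb
--
-- def meets_criteras(n):
--     if n > 999999 or n < 0:
--         return False
--
--     last_number = None
--     nb_adjacent_numbers_in_a_row = 1
--     has_two_adjacent_numbers = False
--
--     for idx in range(nb_digits(n)):
--         digit = nth_digit(n, idx)
--
--         if not last_number is None: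
--             if digit > last_number:
--                 return False
--
--             if digit == last_number:
--                 nb_adjacent_numbers_in_a_row += 1
--             else:
--                 if nb_adjacent_numbers_in_a_row == 2:
--                     has_two_adjacent_numbers = True
--                 nb_adjacent_numbers_in_a_row = 1
--         last_number = digit
--
--     if nb_adjacent_numbers_in_a_row == 2:
--         has_two_adjacent_numbers = True
--
--     return has_two_adjacent_numbers
-- ===== SOURCE B (Python) =====
-- def meets_criteras(n):
--     if n > 999999 or n < 0:
--         return False
--     digits = []
--     m = n
--     while m >= 10:
--         digits.append(m % 10)
--         m //= 10
--     digits.append(m)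
--     return digits == sorted(digits, reverse=True) and any(digits.count(d) == 2 for d in digits)
-- ===== Notes on version B (the rewrite author's own statement) =====
-- stated objective: simpler
-- what changed: B materialises the digit list once and replaces A's stateful right-to-left run-length state machine by two declarative checks: the list equals its descending sort, and some digit occurs exactly twice (occurrence counts equal run lengths once the digits are sorted).
import Mathlib
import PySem

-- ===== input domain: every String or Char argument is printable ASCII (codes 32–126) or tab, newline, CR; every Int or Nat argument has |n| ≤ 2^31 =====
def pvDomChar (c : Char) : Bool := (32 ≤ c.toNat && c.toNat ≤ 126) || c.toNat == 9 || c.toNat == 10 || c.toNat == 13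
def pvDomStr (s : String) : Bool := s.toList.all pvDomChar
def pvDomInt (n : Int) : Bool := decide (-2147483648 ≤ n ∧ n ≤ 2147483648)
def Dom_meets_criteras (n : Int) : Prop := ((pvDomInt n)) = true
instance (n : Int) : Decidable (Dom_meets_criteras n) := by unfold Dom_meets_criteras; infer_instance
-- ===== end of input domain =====

-- B replaces A's right-to-left stateful run-length scan by: extract the digit list once,
-- then check it against its descending sort and look for a digit occurring exactly twice (simpler).

-- termination helper for the `while` loops of both ports (n // 10 shrinks once n ≥ 10)
theorem pv_fdiv10_shrinks {n : Int} (h : (10:Int) ≤ n) :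
    1 ≤ PySem.Int.floordiv n 10 ∧ PySem.Int.floordiv n 10 < n := by
  constructor
  · exact (PySem.Int.le_floordiv_iff_mul_le (by norm_num)).mpr (by omega)
  · exact (PySem.Int.floordiv_lt_iff_lt_mul (by norm_num)).mpr (by nlinarith)

-- ===== PORT A =====
-- 10 ** idx is ported as (10:Int) ^ idx.toNat: exact for idx ≥ 0, and every call site
-- passes idx drawn from range(...), hence idx ≥ 0.
def nth_digit (n idx : Int) : Int :=
  PySem.Int.mod (PySem.Int.floordiv n ((10 : Int) ^ idx.toNat)) 10

def nb_digits_loop (n nb : Int) : Int :=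
  if PySem.Int.floordiv n 10 > 0 then nb_digits_loop (PySem.Int.floordiv n 10) (nb + 1) else nb
termination_by n.toNat
decreasing_by
  have h10 : (10:Int) ≤ n := by
    have := (PySem.Int.le_floordiv_iff_mul_le (a := n) (b := 10) (q := 1) (by norm_num)).mp (by omega)
    omega
  have := pv_fdiv10_shrinks h10
  omega

def nb_digits (n : Int) : Int := nb_digits_loop n 1

def mc_loop (n : Int) : List Int → Option Int → Int → Bool → Bool
  | [], _, row, hasTwo => if row == 2 then true else hasTwo
  | idx :: rest, last, row, hasTwo =>
    let digit := nth_digit n idx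
    match last with
    | none => mc_loop n rest (some digit) row hasTwo
    | some l =>
      if digit > l then false
      else if digit == l then mc_loop n rest (some digit) (row + 1) hasTwo
      else mc_loop n rest (some digit) 1 (if row == 2 then true else hasTwo)

def meets_criteras (n : Int) : Bool :=
  if 999999 < n ∨ n < 0 then false
  else mc_loop n (PySem.List.pyRange 0 (nb_digits n) 1) none 1 false

-- ===== PORT B =====
def extract_loop (m : Int) (digits : List Int) : List Int :=
  if 10 ≤ m then extract_loop (PySem.Int.floordiv m 10) (digits ++ [PySem.Int.mod m 10])
  else digits ++ [m]
termination_by m.toNat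
decreasing_by
  have := pv_fdiv10_shrinks (by omega)
  omega

def meets_criteras_alt (n : Int) : Bool :=
  if 999999 < n ∨ n < 0 then false
  else
    let ds := extract_loop n []
    (ds == PySem.List.sorted ds (fun x => x) true) &&
      ds.any (fun d => ((ds.count d : Int)) == 2)

-- ===== PRECONDITION & SPEC =====
def Spec_meets_criteras (n : Int) (out : Bool) : Prop := out = meets_criteras_alt n
instance (n : Int) (out : Bool) : Decidable (Spec_meets_criteras n out) := by unfold Spec_meets_criteras; infer_instance

-- ===== CLAIM (what is proved, stated in full; the proofs are below) =====
def Claim_equal_meets_criteras : Prop := ∀ (n : Int), Dom_meets_criteras n → Spec_meets_criteras n (meets_criteras n)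

-- ===== LEMMAS AND PROOFS =====

-- the digit list of m, least-significant first (the tail B's while-loop appends)
def tailD (m : Int) : List Int :=
  if 10 ≤ m then PySem.Int.mod m 10 :: tailD (PySem.Int.floordiv m 10) else [m]
termination_by m.toNat
decreasing_by
  have := pv_fdiv10_shrinks (by omega)
  omega

-- A's loop body once `last` is set, abstracted over the digit list
def loopD : List Int → Int → Int → Bool → Bool
  | [], _, row, hasTwo => if row == 2 then true else hasTwo
  | d :: ds, l, row, hasTwo =>
    if d > l then false
    else if d == l then loopD ds d (row + 1) hasTwo
    else loopD ds d 1 (if row == 2 then true else hasTwo)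

-- the run-of-exactly-two detector A's loop computes when no early exit fires
def runT : List Int → Int → Int → Bool
  | [], _, row => row == 2
  | d :: ds, l, row => if d == l then runT ds l (row + 1) else ((row == 2) || runT ds d 1)

theorem extract_loop_eq (m : Int) (acc : List Int) : extract_loop m acc = acc ++ tailD m := by
  rw [extract_loop, tailD]
  split
  · rw [extract_loop_eq (PySem.Int.floordiv m 10) (acc ++ [PySem.Int.mod m 10])]
    simp
  · rfl
termination_by m.toNat
decreasing_by
  have := pv_fdiv10_shrinks (by omega)
  omega

theorem nb_loop_acc (n nb c : Int) : nb_digits_loop n (nb + c) = nb_digits_loop n nb + c := by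
  conv_lhs => rw [nb_digits_loop]
  conv_rhs => rw [nb_digits_loop]
  by_cases h : PySem.Int.floordiv n 10 > 0
  · rw [if_pos h, if_pos h, show nb + c + 1 = (nb + 1) + c by ring,
      nb_loop_acc (PySem.Int.floordiv n 10) (nb + 1) c]
  · rw [if_neg h, if_neg h]
termination_by n.toNat
decreasing_by
  have h10 : (10:Int) ≤ n := by
    have := (PySem.Int.le_floordiv_iff_mul_le (a := n) (b := 10) (q := 1) (by norm_num)).mp (by omega)
    omega
  have := pv_fdiv10_shrinks h10
  omega

theorem nb_digits_lt10 {n : Int} (h0 : 0 ≤ n) (h : n < 10) : nb_digits n = 1 := by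
  have hz : PySem.Int.floordiv n 10 = 0 :=
    (PySem.Int.floordiv_eq_iff_of_pos (by norm_num)).mpr (by omega)
  rw [nb_digits, nb_digits_loop, hz]
  simp

theorem nb_digits_ge10 {n : Int} (h : (10:Int) ≤ n) :
    nb_digits n = nb_digits (PySem.Int.floordiv n 10) + 1 := by
  have h1 := pv_fdiv10_shrinks h
  rw [nb_digits, nb_digits_loop, if_pos (by omega)]
  rw [show (1:Int) + 1 = 1 + 1 by rfl, nb_loop_acc (PySem.Int.floordiv n 10) 1 1]
  rfl

theorem nb_loop_ge (n nb : Int) : nb ≤ nb_digits_loop n nb := by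
  rw [nb_digits_loop]
  split
  · have := nb_loop_ge (PySem.Int.floordiv n 10) (nb + 1)
    omega
  · exact le_refl nb
termination_by n.toNat
decreasing_by
  have h10 : (10:Int) ≤ n := by
    have := (PySem.Int.le_floordiv_iff_mul_le (a := n) (b := 10) (q := 1) (by norm_num)).mp (by omega)
    omega
  have := pv_fdiv10_shrinks h10
  omega

theorem nb_digits_pos (n : Int) : 1 ≤ nb_digits n := nb_loop_ge n 1

theorem fdiv10_nonneg {n : Int} (h0 : 0 ≤ n) : 0 ≤ PySem.Int.floordiv n 10 :=
  (PySem.Int.le_floordiv_iff_mul_le (by norm_num)).mpr (by omega)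

theorem nth_digit_zero (n : Int) : nth_digit n 0 = PySem.Int.mod n 10 := by
  simp [nth_digit, PySem.Int.floordiv_eq_ediv_of_pos (by norm_num : (0:Int) < 1)]

theorem nth_digit_succ (n : Int) (j : Nat) (h0 : 0 ≤ n) :
    nth_digit n ((j : Int) + 1) = nth_digit (PySem.Int.floordiv n 10) (j : Int) := by
  have ht : (((j : Int) + 1)).toNat = j + 1 := by omega
  have hp1 : (0:Int) < 10 ^ (j + 1) := by positivity
  have hpj : (0:Int) < 10 ^ j := by positivity
  rw [nth_digit, nth_digit, ht]
  simp only [Int.toNat_natCast]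
  congr 1
  rw [PySem.Int.floordiv_eq_ediv_of_pos hp1,
      PySem.Int.floordiv_eq_ediv_of_pos hpj,
      PySem.Int.floordiv_eq_ediv_of_pos (by norm_num : (0:Int) < 10),
      Int.ediv_ediv_of_nonneg (by norm_num : (0:Int) ≤ 10)]
  congr 1
  ring

theorem mod10_self {n : Int} (h0 : 0 ≤ n) (h : n < 10) : PySem.Int.mod n 10 = n := by
  rw [PySem.Int.mod_eq_emod_of_pos (by norm_num)]
  omega

theorem tailD_lt10 {n : Int} (h : n < 10) : tailD n = [n] := by
  rw [tailD, if_neg (by omega)]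

theorem tailD_ge10 {n : Int} (h : (10:Int) ≤ n) :
    tailD n = PySem.Int.mod n 10 :: tailD (PySem.Int.floordiv n 10) := by
  rw [tailD, if_pos h]

theorem digitsA_eq (K : Nat) : ∀ n : Int, 0 ≤ n → nb_digits n = (K : Int) →
    List.map (fun j : Nat => nth_digit n (j : Int)) (List.range K) = tailD n := by
  induction K with
  | zero =>
    intro n _ hk
    have := nb_digits_pos n
    omega
  | succ K ih =>
    intro n h0 hk
    by_cases h : n < 10
    · have h1 : nb_digits n = 1 := nb_digits_lt10 h0 h
      have hK0 : K = 0 := by omega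
      subst hK0
      simp only [List.range_succ, List.range_zero, List.nil_append, List.map_cons, List.map_nil,
        Nat.cast_zero, nth_digit_zero, tailD_lt10 h]
      rw [mod10_self h0 h]
    · push Not at h
      have hstep := nb_digits_ge10 h
      have hK : nb_digits (PySem.Int.floordiv n 10) = (K : Int) := by omega
      rw [List.range_succ_eq_map, List.map_cons, List.map_map, tailD_ge10 h]
      congr 1
      · exact nth_digit_zero n
      · rw [← ih (PySem.Int.floordiv n 10) (fdiv10_nonneg h0) hK]
        apply List.map_congr_left
        intro j _
        simp only [Function.comp_apply, Nat.succ_eq_add_one, Nat.cast_add, Nat.cast_one]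
        exact nth_digit_succ n j h0

theorem mc_loop_some (n : Int) (idxs : List Int) : ∀ l row h2,
    mc_loop n idxs (some l) row h2 = loopD (idxs.map (nth_digit n)) l row h2 := by
  induction idxs with
  | nil => intro l row h2; rfl
  | cons i is ih =>
    intro l row h2
    simp only [mc_loop, loopD, List.map_cons]
    split
    · rfl
    · split
      · exact ih _ _ _
      · exact ih _ _ _

theorem loopD_eq (ds : List Int) : ∀ l row h2,
    loopD ds l row h2 =
      (decide (List.Pairwise (fun a b : Int => b ≤ a) (l :: ds)) && (h2 || runT ds l row)) := by
  induction ds with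
  | nil =>
    intro l row h2
    by_cases hr : row = 2 <;> cases h2 <;> simp [loopD, runT, hr]
  | cons d ds ih =>
    intro l row h2
    by_cases h1 : d > l
    · have hnp : ¬ List.Pairwise (fun a b : Int => b ≤ a) (l :: d :: ds) := by
        intro hp
        have := (List.pairwise_cons.mp hp).1 d (by simp)
        omega
      simp [loopD, h1, hnp]
    · by_cases h2d : d = l
      · subst h2d
        rw [loopD, runT, if_neg h1, if_pos (by simp), if_pos (by simp), ih]
        have hiff : List.Pairwise (fun a b : Int => b ≤ a) (d :: d :: ds) ↔
            List.Pairwise (fun a b : Int => b ≤ a) (d :: ds) := by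
          constructor
          · intro hp; exact (List.pairwise_cons.mp hp).2
          · intro hp
            rw [List.pairwise_cons]
            refine ⟨?_, hp⟩
            intro x hx
            rcases List.mem_cons.mp hx with h | h
            · omega
            · exact (List.pairwise_cons.mp hp).1 x h
        have hdec : decide (List.Pairwise (fun a b : Int => b ≤ a) (d :: d :: ds))
            = decide (List.Pairwise (fun a b : Int => b ≤ a) (d :: ds)) :=
          decide_eq_decide.mpr hiff
        rw [hdec]
      · rw [loopD, if_neg h1, if_neg (by simpa using h2d), ih]
        conv_rhs => rw [runT, if_neg (by simpa using h2d : ¬ (d == l) = true)]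
        have hiff : List.Pairwise (fun a b : Int => b ≤ a) (l :: d :: ds) ↔
            List.Pairwise (fun a b : Int => b ≤ a) (d :: ds) := by
          constructor
          · intro hp; exact (List.pairwise_cons.mp hp).2
          · intro hp
            rw [List.pairwise_cons]
            refine ⟨?_, hp⟩
            intro x hx
            rcases List.mem_cons.mp hx with h | h
            · omega
            · have := (List.pairwise_cons.mp hp).1 x h
              omega
        have hdec : decide (List.Pairwise (fun a b : Int => b ≤ a) (l :: d :: ds))
            = decide (List.Pairwise (fun a b : Int => b ≤ a) (d :: ds)) :=
          decide_eq_decide.mpr hiff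
        rw [hdec]
        by_cases hr : row = 2
        · cases h2 <;> simp [hr]
        · have hb : (row == 2) = false := beq_eq_false_iff_ne.mpr hr
          cases h2 <;> simp [hb]
theorem runT_iff (ds : List Int) : ∀ l row,
    List.Pairwise (fun a b : Int => b ≤ a) (l :: ds) →
    (runT ds l row = true ↔
      (row + (ds.count l : Int) = 2 ∨ ∃ x ∈ ds, x ≠ l ∧ (ds.count x : Int) = 2)) := by
  induction ds with
  | nil =>
    intro l row _
    simp [runT]
  | cons d ds ih =>
    intro l row hp
    have hd_le : d ≤ l := (List.pairwise_cons.mp hp).1 d (by simp)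
    have hp_tail : List.Pairwise (fun a b : Int => b ≤ a) (d :: ds) := (List.pairwise_cons.mp hp).2
    by_cases hdl : d = l
    · subst hdl
      rw [runT, if_pos (by simp)]
      have hp_d : List.Pairwise (fun a b : Int => b ≤ a) (d :: ds) := hp_tail
      rw [ih d (row + 1) hp_d]
      constructor
      · rintro (h | ⟨x, hx, hxl, hc⟩)
        · left; rw [List.count_cons_self]; push_cast; omega
        · right
          exact ⟨x, by simp [hx], hxl, by rw [List.count_cons_of_ne (Ne.symm hxl)]; exact hc⟩
      · rintro (h | ⟨x, hx, hxl, hc⟩)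
        · left; rw [List.count_cons_self] at h; push_cast at h ⊢; omega
        · right
          rcases List.mem_cons.mp hx with rfl | hx'
          · exact absurd rfl hxl
          · exact ⟨x, hx', hxl, by rw [List.count_cons_of_ne (Ne.symm hxl)] at hc; exact hc⟩
    · have hdlt : d < l := lt_of_le_of_ne hd_le hdl
      have hnotmem : l ∉ (d :: ds) := by
        intro hmem
        rcases List.mem_cons.mp hmem with rfl | h
        · omega
        · have := (List.pairwise_cons.mp hp_tail).1 l h
          omega
      have hcl0 : (d :: ds).count l = 0 := List.count_eq_zero.mpr hnotmem
      rw [runT, if_neg (by simpa using hdl)]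
      rw [Bool.or_eq_true, ih d 1 hp_tail]
      have hne_l : ∀ x ∈ (d :: ds), x ≠ l := by
        intro x hx heq
        exact hnotmem (heq ▸ hx)
      constructor
      · rintro (hr | h | ⟨x, hx, hxd, hc⟩)
        · left; rw [hcl0]; simpa using hr
        · right
          exact ⟨d, by simp, hdl, by rw [List.count_cons_self]; push_cast at h ⊢; omega⟩
        · right
          exact ⟨x, by simp [hx], hne_l x (by simp [hx]),
            by rw [List.count_cons_of_ne (Ne.symm hxd)]; exact hc⟩
      · rintro (h | ⟨x, hx, _, hc⟩)
        · left; rw [hcl0] at h; simpa using h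
        · right
          by_cases hxd : x = d
          · subst hxd
            left; rw [List.count_cons_self] at hc; push_cast at hc ⊢; omega
          · right
            rcases List.mem_cons.mp hx with rfl | hx'
            · exact absurd rfl hxd
            · exact ⟨x, hx', hxd, by rw [List.count_cons_of_ne (Ne.symm hxd)] at hc; exact hc⟩

theorem sorted_beq_eq (ds : List Int) :
    (ds == PySem.List.sorted ds (fun x => x) true) =
      decide (List.Pairwise (fun a b : Int => b ≤ a) ds) := by
  by_cases hp : List.Pairwise (fun a b : Int => b ≤ a) ds
  · rw [PySem.List.sorted_rev_eq_self_of_pairwise ds (fun x => x) hp]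
    simp [hp]
  · have hne : ds ≠ PySem.List.sorted ds (fun x => x) true := by
      intro h
      apply hp
      rw [h]
      exact PySem.List.sorted_pairwise_rev ds (fun x => x)
    simp [hp, hne]

-- ===== VERDICT (by name: the statement is the Claim_ definition above) =====
theorem meets_criteras_spec : Claim_equal_meets_criteras := by
  intro n _
  unfold Spec_meets_criteras meets_criteras meets_criteras_alt
  by_cases hg : 999999 < n ∨ n < 0
  · rw [if_pos hg, if_pos hg]
  · rw [if_neg hg, if_neg hg]
    push Not at hg
    have h0 : 0 ≤ n := hg.2
    -- the digit list
    have hext : extract_loop n [] = tailD n := by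
      rw [extract_loop_eq n []]; rfl
    have hKnn : (0:Int) ≤ nb_digits n := le_of_lt (lt_of_lt_of_le zero_lt_one (nb_digits_pos n))
    have hdig : (PySem.List.pyRange 0 (nb_digits n) 1).map (nth_digit n) = tailD n := by
      rw [PySem.List.pyRange_one 0 (nb_digits n), List.map_map]
      rw [← digitsA_eq (nb_digits n - 0).toNat n h0 (by omega)]
      apply List.map_congr_left
      intro j _
      simp [Function.comp_apply]
    cases htl : tailD n with
    | nil =>
      exfalso
      have hne : tailD n ≠ [] := by rw [tailD]; split <;> simp
      exact hne htl
    | cons d0 rest =>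
      rw [htl] at hdig
      rcases List.map_eq_cons_iff.mp hdig with ⟨i0, is, hidx, hd0, hrest⟩
      rw [hidx]
      have hA : mc_loop n (i0 :: is) none 1 false = loopD rest d0 1 false := by
        show mc_loop n is (some (nth_digit n i0)) 1 false = _
        rw [mc_loop_some, hrest, hd0]
      rw [hA, loopD_eq]
      simp only [hext, htl]
      rw [sorted_beq_eq]
      by_cases hp : List.Pairwise (fun a b : Int => b ≤ a) (d0 :: rest)
      · rw [decide_eq_true hp]
        simp only [Bool.true_and, Bool.false_or]
        rw [Bool.eq_iff_iff]
        rw [runT_iff rest d0 1 hp]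
        simp only [List.any_eq_true, beq_iff_eq]
        constructor
        · rintro (h | ⟨x, hx, hxl, hc⟩)
          · exact ⟨d0, by simp, by rw [List.count_cons_self]; push_cast at h ⊢; omega⟩
          · exact ⟨x, by simp [hx], by rw [List.count_cons_of_ne (Ne.symm hxl)]; exact hc⟩
        · rintro ⟨x, hx, hc⟩
          by_cases hxd : x = d0
          · subst hxd
            left; rw [List.count_cons_self] at hc; push_cast at hc ⊢; omega
          · rcases List.mem_cons.mp hx with rfl | hx'
            · exact absurd rfl hxd
            · right
              exact ⟨x, hx', hxd, by rw [List.count_cons_of_ne (Ne.symm hxd)] at hc; exact hc⟩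
      · rw [decide_eq_false hp]
        simp
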